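-- pv_equiv track=rewrite | github.com/mukta2020/ProblemSolving | waterArea.py | partOfArea
-- ===== SOURCE A (Python) =====
-- def partOfArea(heights):
--     lower = heights[0]
--     area = 0
--     for i in range(1, len(heights)):
--         if heights[i] == 0:
--             area += lower
--         elif heights[i] < lower:
--             area += lower - heights[i]
--         elif heights[i] > lower:
--             lower = heights[i]
--     return area
-- ===== SOURCE B (Python) =====
-- def partOfArea(heights):
--     # Divide and conquer: a segment's water depends only on the level entering
--     # it; solve halves and thread the level from left half into the right.
--     def go(lo, hi, level):
--         # water over heights[lo:hi] entered at `level`, and the level after it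
--         if lo >= hi:
--             return (0, level)
--         if hi - lo == 1:
--             h = heights[lo]
--             if h == 0:
--                 return (level, level)
--             return (max(level - h, 0), max(level, h))
--         mid = (lo + hi) // 2
--         a1, lv1 = go(lo, mid, level)
--         a2, lv2 = go(mid, hi, lv1)
--         return (a1 + a2, lv2)
--     return go(1, len(heights), heights[0])[0]
-- ===== Notes on version B (the rewrite author's own statement) =====
-- stated objective: alternative
-- what changed: Replaces A's single left-to-right scan with mutable running level and accumulator by a recursive divide-and-conquer over index ranges: each half-segment is solved independently given its entry level, the left half's exit level is threaded into the right half, and the two water amounts are added.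
import Mathlib
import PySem

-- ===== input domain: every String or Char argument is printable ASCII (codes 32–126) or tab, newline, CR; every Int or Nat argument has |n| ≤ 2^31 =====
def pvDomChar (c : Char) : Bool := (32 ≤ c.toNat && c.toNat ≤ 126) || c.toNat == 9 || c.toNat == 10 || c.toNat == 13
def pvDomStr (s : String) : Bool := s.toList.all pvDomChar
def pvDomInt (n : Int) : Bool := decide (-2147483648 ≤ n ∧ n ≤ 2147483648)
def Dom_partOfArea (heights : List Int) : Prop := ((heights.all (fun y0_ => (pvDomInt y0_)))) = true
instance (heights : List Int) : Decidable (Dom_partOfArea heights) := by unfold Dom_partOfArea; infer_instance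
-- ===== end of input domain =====

-- B replaces A's single mutable left-to-right scan by a divide-and-conquer over index
-- ranges that threads the left half's exit level into the right half (objective: alternative).

-- ===== PORT A =====
def partOfArea (heights : List Int) : Int :=
  let lower := PySem.List.pyGetD heights 0 0   -- first element; Pre_ excludes the empty list where Python raises IndexError
  ((PySem.List.pyRange 1 (heights.length : Int) 1).foldl
    (fun (st : Int × Int) i =>
      let h := PySem.List.pyGetD heights i 0   -- in range for i ∈ range(1, len)
      if h = 0 then (st.1, st.2 + st.1)
      else if h < st.1 then (st.1, st.2 + (st.1 - h))
      else if h > st.1 then (h, st.2)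
      else st)
    (lower, 0)).2

-- ===== PORT B =====
-- fuel = a totality guard only: it bounds the recursion depth and is never exhausted
-- when fuel ≥ hi - lo (the alt entry passes heights.length).
def partOfAreaGo (heights : List Int) (fuel : Nat) (lo hi level : Int) : Int × Int :=
  match fuel with
  | 0 => (0, level)
  | fuel + 1 =>
    if lo ≥ hi then (0, level)
    else if hi - lo = 1 then
      let h := PySem.List.pyGetD heights lo 0    -- heights[lo]; lo in range by the recursion's invariant
      if h = 0 then (level, level)
      else (max (level - h) 0, max level h)
    else
      let mid := PySem.Int.floordiv (lo + hi) 2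
      let p1 := partOfAreaGo heights fuel lo mid level
      let p2 := partOfAreaGo heights fuel mid hi p1.2
      (p1.1 + p2.1, p2.2)

def partOfArea_alt (heights : List Int) : Int :=
  (partOfAreaGo heights heights.length 1 (heights.length : Int) (PySem.List.pyGetD heights 0 0)).1

-- ===== PRECONDITION & SPEC =====
-- Pre_ excludes exactly the empty list, on which both Pythons raise IndexError reading the first element.
def Pre_partOfArea (heights : List Int) : Prop := heights ≠ []
instance (heights : List Int) : Decidable (Pre_partOfArea heights) := by unfold Pre_partOfArea; infer_instance
def pvWitness_partOfArea : List Int := [3, 0, 2, 5, 1]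

def Spec_partOfArea (heights : List Int) (out : Int) : Prop := out = partOfArea_alt heights
instance (heights : List Int) (out : Int) : Decidable (Spec_partOfArea heights out) := by unfold Spec_partOfArea; infer_instance

-- ===== CLAIM (what is proved, stated in full; the proofs are below) =====
def Claim_equal_partOfArea : Prop := ∀ (heights : List Int), Dom_partOfArea heights → Pre_partOfArea heights → Spec_partOfArea heights (partOfArea heights)

-- ===== LEMMAS AND PROOFS =====

-- total water from tail t entered at level x
def pvG (x : Int) : List Int → Int
  | [] => 0
  | h :: t => (if h = 0 then x else max (x - h) 0) + pvG (if h = 0 then x else max x h) t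

-- level after traversing t entered at level x
def pvLvl (x : Int) : List Int → Int
  | [] => x
  | h :: t => pvLvl (if h = 0 then x else max x h) t

def pvStep (st : Int × Int) (h : Int) : Int × Int :=
  if h = 0 then (st.1, st.2 + st.1)
  else if h < st.1 then (st.1, st.2 + (st.1 - h))
  else if h > st.1 then (h, st.2)
  else st

theorem pvA_fold (t : List Int) : ∀ (x a : Int),
    (t.foldl pvStep (x, a)).2 = a + pvG x t := by
  induction t with
  | nil => intro x a; simp [pvG]
  | cons h t ih =>
    intro x a
    simp only [List.foldl_cons, pvG, pvStep]
    by_cases h0 : h = 0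
    · simp only [h0, ih]; ring_nf; simp
    · rw [if_neg h0]
      by_cases hlt : h < x
      · rw [if_pos hlt]
        simp only [if_neg h0, ih]
        have : max (x - h) 0 = x - h := by omega
        have hm : max x h = x := by omega
        rw [this, hm]; ring
      · rw [if_neg hlt]
        by_cases hgt : h > x
        · rw [if_pos hgt]
          simp only [if_neg h0, ih]
          have : max (x - h) 0 = 0 := by omega
          have hm : max x h = h := by omega
          rw [this, hm]; ring
        · rw [if_neg hgt]
          simp only [if_neg h0, ih]
          have : max (x - h) 0 = 0 := by omega
          have hm : max x h = x := by omega
          rw [this, hm]; ring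

theorem pvG_append (s : List Int) : ∀ (t : List Int) (x : Int),
    pvG x (s ++ t) = pvG x s + pvG (pvLvl x s) t := by
  induction s with
  | nil => intro t x; simp [pvG, pvLvl]
  | cons h s ih => intro t x; simp only [List.cons_append, pvG, pvLvl, ih]; ring

theorem pvLvl_append (s : List Int) : ∀ (t : List Int) (x : Int),
    pvLvl x (s ++ t) = pvLvl (pvLvl x s) t := by
  induction s with
  | nil => intro t x; simp [pvLvl]
  | cons h s ih => intro t x; simp only [List.cons_append, pvLvl, ih]

-- the segment heights[lo:hi]
def pvSeg (heights : List Int) (lo hi : Int) : List Int :=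
  (heights.drop lo.toNat).take (hi - lo).toNat

theorem pvSeg_split (heights : List Int) (lo mid hi : Int)
    (h1 : 0 ≤ lo) (h2 : lo ≤ mid) (h3 : mid ≤ hi) :
    pvSeg heights lo hi = pvSeg heights lo mid ++ pvSeg heights mid hi := by
  unfold pvSeg
  have hcast : (hi - lo).toNat = (mid - lo).toNat + (hi - mid).toNat := by omega
  rw [hcast, List.take_add]
  congr 1
  rw [List.drop_drop]
  congr 2
  omega

theorem pvSeg_single (heights : List Int) (lo : Int)
    (h0 : 0 ≤ lo) (hlt : lo < (heights.length : Int)) :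
    pvSeg heights lo (lo + 1) = [heights[lo.toNat]'(by omega)] := by
  unfold pvSeg
  have : (lo + 1 - lo).toNat = 1 := by omega
  rw [this]
  have hd : lo.toNat < heights.length := by omega
  rw [List.take_one, List.head?_drop, List.getElem?_eq_getElem hd]
  rfl

theorem pvGo_eq (heights : List Int) :
    ∀ (fuel : Nat) (lo hi level : Int), (hi - lo).toNat ≤ fuel → 0 ≤ lo →
    hi ≤ (heights.length : Int) →
    partOfAreaGo heights fuel lo hi level
      = (pvG level (pvSeg heights lo hi), pvLvl level (pvSeg heights lo hi)) := by
  intro fuel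
  induction fuel with
  | zero =>
    intro lo hi level hfuel h0 hlen
    have hseg : pvSeg heights lo hi = [] := by
      unfold pvSeg
      have : (hi - lo).toNat = 0 := by omega
      rw [this]; simp
    rw [hseg]; simp [partOfAreaGo, pvG, pvLvl]
  | succ fuel ih =>
    intro lo hi level hfuel h0 hlen
    show (if lo ≥ hi then (0, level)
      else if hi - lo = 1 then
        let h := PySem.List.pyGetD heights lo 0
        if h = 0 then (level, level) else (max (level - h) 0, max level h)
      else
        let mid := PySem.Int.floordiv (lo + hi) 2
        let p1 := partOfAreaGo heights fuel lo mid level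
        let p2 := partOfAreaGo heights fuel mid hi p1.2
        (p1.1 + p2.1, p2.2)) = _
    by_cases hge : lo ≥ hi
    · rw [if_pos hge]
      have : pvSeg heights lo hi = [] := by
        unfold pvSeg
        have : (hi - lo).toNat = 0 := by omega
        rw [this]; simp
      rw [this]; simp [pvG, pvLvl]
    · rw [if_neg hge]
      by_cases h1 : hi - lo = 1
      · rw [if_pos h1]
        have hhi : hi = lo + 1 := by omega
        have hlt : lo < (heights.length : Int) := by omega
        rw [hhi, pvSeg_single heights lo h0 hlt]
        have hget : PySem.List.pyGetD heights lo 0 = heights[lo.toNat]'(by omega) :=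
          PySem.List.pyGetD_eq_getElem heights 0 h0 (by omega)
        simp only [hget, pvG, pvLvl]
        by_cases hz : heights[lo.toNat]'(by omega) = 0
        · rw [if_pos hz, if_pos hz, if_pos hz]; simp
        · rw [if_neg hz, if_neg hz, if_neg hz]; simp
      · rw [if_neg h1]
        set mid := PySem.Int.floordiv (lo + hi) 2 with hmid
        have hmb : lo + 1 ≤ mid ∧ mid + 1 ≤ hi := by
          rw [hmid, PySem.Int.floordiv_eq_ediv_of_pos (by omega)]; omega
        show ((partOfAreaGo heights fuel lo mid level).1
                + (partOfAreaGo heights fuel mid hi (partOfAreaGo heights fuel lo mid level).2).1,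
              (partOfAreaGo heights fuel mid hi (partOfAreaGo heights fuel lo mid level).2).2) = _
        rw [ih lo mid level (by omega) h0 (by omega),
            ih mid hi _ (by omega) (by omega) hlen]
        rw [pvSeg_split heights lo mid hi h0 (by omega) (by omega),
            pvG_append, pvLvl_append]

theorem partOfArea_eq_alt (x : Int) (t : List Int) :
    partOfArea (x :: t) = partOfArea_alt (x :: t) := by
  unfold partOfArea partOfArea_alt
  show ((PySem.List.pyRange 1 ((x :: t).length : Int) 1).foldl
      (fun st i => pvStep st (PySem.List.pyGetD (x :: t) i 0))
      (PySem.List.pyGetD (x :: t) 0 0, 0)).2 = _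
  rw [PySem.List.foldl_pyRange_pyGetD' (x :: t) 0 pvStep _ (by omega : (0:Int) ≤ 1)]
  rw [pvA_fold]
  have hdrop : (x :: t).drop (Int.toNat 1) = t := rfl
  rw [hdrop]
  rw [pvGo_eq (x :: t) (x :: t).length 1 ((x :: t).length : Int)
      (PySem.List.pyGetD (x :: t) 0 0) (by simp) (by omega) (by omega)]
  have hseg : pvSeg (x :: t) 1 ((x :: t).length : Int) = t := by
    unfold pvSeg
    simp only [List.length_cons]
    have h1 : (1 : Int).toNat = 1 := rfl
    have h2 : ((((t.length : Int) + 1) - 1)).toNat = t.length := by omega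
    rw [h1]
    simp only [List.drop_one, List.tail_cons]
    rw [show ((t.length + 1 : Nat) : Int) - 1 = (t.length : Int) by push_cast; ring]
    simp
  rw [hseg, PySem.List.pyGetD_zero_cons]
  simp

-- ===== VERDICT (by name: the statement is the Claim_ definition above) =====
theorem partOfArea_spec : Claim_equal_partOfArea := by
  intro heights _ hpre
  cases heights with
  | nil => exact absurd rfl hpre
  | cons x t => exact partOfArea_eq_alt x t
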